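-- pv_equiv track=rewrite | github.com/zjf2671/hello-agents | Co-creation-projects/YYHDBL-HelloCodeAgentCli/tools/builtin/terminal_tool.py | _has_unquoted
-- ===== SOURCE A (Python) =====
-- from typing import Dict, Any, List, Optional
--
-- def _has_unquoted(command: str, token: str) -> bool:
--     """检查token（如>或$()或|）是否出现在引号外
--
--     这个方法用于检测可能存在安全风险的shell操作符，
--     确保它们不是在引号内（引号内是安全的字符串字面量）。
--
--     Args:
--         command: 要检查的命令字符串
--         token: 要查找的token字符串
--
--     Returns:
--         bool: 如果token出现在引号外返回True，否则返回False
--     """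
--     q: Optional[str] = None
--     i = 0
--     while i < len(command):
--         ch = command[i]
--         if ch in {"'", '"'}:
--             if q is None:
--                 q = ch
--             elif q == ch:
--                 q = None
--             i += 1
--             continue
--         if ch == "\\":
--             i += 2
--             continue
--         if q is None and command.startswith(token, i):
--             return True
--         i += 1
--     return False
-- ===== SOURCE B (Python) =====
-- def _has_unquoted(command: str, token: str) -> bool:
--     # Phase 1: one for-loop with a boolean skip flag (no manual index jumps)
--     # records the set of unquoted, unescaped positions.
--     tested = set()
--     q = None
--     skip = False
--     for i, ch in enumerate(command):
--         if skip:
--             skip = False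
--         elif ch == "'" or ch == '"':
--             if q is None:
--                 q = ch
--             elif q == ch:
--                 q = None
--         elif ch == "\\":
--             skip = True
--         elif q is None:
--             tested.add(i)
--     # Phase 2: substring search drives the loop — each real occurrence of
--     # token in command is accepted iff it starts at a recorded position.
--     j = command.find(token)
--     while j != -1:
--         if j in tested:
--             return True
--         j = command.find(token, j + 1)
--     return False
-- ===== Notes on version B (the rewrite author's own statement) =====
-- stated objective: alternative
-- what changed: B replaces A's single while-loop (quote state, manual index jumps, inline startswith test with early return) by two different mechanisms: a for/enumerate scan with a boolean skip flag that builds a set of unquoted candidate positions, and then a str.find-driven substring-search loop over the real occurrences of token that checks set membership.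
import Mathlib
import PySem

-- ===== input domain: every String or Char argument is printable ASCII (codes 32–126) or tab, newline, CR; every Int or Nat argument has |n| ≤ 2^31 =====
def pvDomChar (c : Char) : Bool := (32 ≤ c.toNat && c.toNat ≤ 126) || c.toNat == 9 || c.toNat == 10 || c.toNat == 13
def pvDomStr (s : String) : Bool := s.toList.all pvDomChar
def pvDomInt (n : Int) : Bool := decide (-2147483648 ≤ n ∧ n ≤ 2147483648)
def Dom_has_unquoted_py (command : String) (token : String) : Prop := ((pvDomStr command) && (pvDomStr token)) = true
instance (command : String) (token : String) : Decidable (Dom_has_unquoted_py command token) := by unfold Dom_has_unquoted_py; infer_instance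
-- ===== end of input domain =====

-- B: the quote scan records a set of candidate positions once, then a substring-search (str.find) loop over real token occurrences checks set membership (alternative algorithm, same asymptotic cost).


-- ===== PORT A =====
-- command.startswith(token, i) with 0 ≤ i: token is a prefix of command[i:] (exact for nonnegative i, the only use here)
def pvStartsAt (cs tok : List Char) (i : Nat) : Bool := tok.isPrefixOf (cs.drop i)

-- the while loop of A: quote state q ('if q is None / elif q == ch' as an if-chain),
-- index i (stepping by 2 over backslashes), inline test with early return
def pvLoopA (cs tok : List Char) (q : Option Char) (i : Nat) : Bool :=
  if h : i < cs.length then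
    if cs[i] = '\'' ∨ cs[i] = '"' then
      if q = none then pvLoopA cs tok (some cs[i]) (i + 1)
      else if q = some cs[i] then pvLoopA cs tok none (i + 1)
      else pvLoopA cs tok q (i + 1)
    else if cs[i] = '\\' then pvLoopA cs tok q (i + 2)
    else if q = none ∧ pvStartsAt cs tok i then true
    else pvLoopA cs tok q (i + 1)
  else false
termination_by cs.length - i

def has_unquoted_py (command : String) (token : String) : Bool :=
  pvLoopA command.toList token.toList none 0

-- ===== PORT B =====
-- phase 1 of Source B: the for-loop over enumerate(command) with quote state q and boolean
-- skip flag, recording the unquoted, unescaped positions into the Python set `tested`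
def pvScanB (l : List (Int × Char)) (q : Option Char) (skip : Bool) (tested : PySem.Set Int) : PySem.Set Int :=
  match l with
  | [] => tested
  | p :: rest =>
    if skip then pvScanB rest q false tested
    else if p.2 = '\'' ∨ p.2 = '"' then
      if q = none then pvScanB rest (some p.2) false tested
      else if q = some p.2 then pvScanB rest none false tested
      else pvScanB rest q false tested
    else if p.2 = '\\' then pvScanB rest q true tested
    else if q = none then pvScanB rest q false (PySem.Set.add tested p.1)
    else pvScanB rest q false tested

-- phase 2 of Source B: 'j = command.find(token); while j != -1: …; j = command.find(token, j+1)'.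
-- The fuel argument only makes the loop total: j strictly increases and length+2 steps always suffice.
def pvFindWhile (cs tok : List Char) (tested : PySem.Set Int) : Nat → Int → Bool
  | 0, _ => false
  | fuel + 1, j =>
    if j = -1 then false
    else if PySem.Set.contains tested j then true
    else pvFindWhile cs tok tested fuel (PySem.Chars.findFrom cs tok (j + 1) none)

def has_unquoted_py_alt (command : String) (token : String) : Bool :=
  let cs := command.toList
  let tested := pvScanB (PySem.List.enumerate cs 0) none false PySem.Set.empty
  pvFindWhile cs token.toList tested (cs.length + 2) (PySem.Chars.find cs token.toList)

-- ===== PRECONDITION & SPEC =====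
def Spec_has_unquoted_py (command : String) (token : String) (out : Bool) : Prop := out = has_unquoted_py_alt command token
instance (command : String) (token : String) (out : Bool) : Decidable (Spec_has_unquoted_py command token out) := by unfold Spec_has_unquoted_py; infer_instance

-- ===== CLAIM (what is proved, stated in full; the proofs are below) =====
def Claim_equal_has_unquoted_py : Prop := ∀ (command : String) (token : String), Dom_has_unquoted_py command token → Spec_has_unquoted_py command token (has_unquoted_py command token)

-- ===== LEMMAS AND PROOFS =====
-- proof helper: the list of positions A ever tests (same recursion shape as A's loop, no token)
def pvStarts (cs : List Char) (q : Option Char) (i : Nat) : List Nat :=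
  if h : i < cs.length then
    if cs[i] = '\'' ∨ cs[i] = '"' then
      if q = none then pvStarts cs (some cs[i]) (i + 1)
      else if q = some cs[i] then pvStarts cs none (i + 1)
      else pvStarts cs q (i + 1)
    else if cs[i] = '\\' then pvStarts cs q (i + 2)
    else if q = none then i :: pvStarts cs q (i + 1)
    else pvStarts cs q (i + 1)
  else []
termination_by cs.length - i

-- one-step unfolding of pvScanB on a cons cell (definitional)
theorem pvScanB_cons (p : Int × Char) (rest : List (Int × Char)) (q : Option Char) (skip : Bool) (S : PySem.Set Int) :
  pvScanB (p :: rest) q skip S =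
    if skip then pvScanB rest q false S
    else if p.2 = '\'' ∨ p.2 = '"' then
      if q = none then pvScanB rest (some p.2) false S
      else if q = some p.2 then pvScanB rest none false S
      else pvScanB rest q false S
    else if p.2 = '\\' then pvScanB rest q true S
    else if q = none then pvScanB rest q false (PySem.Set.add S p.1)
    else pvScanB rest q false S := rfl

-- A's loop computes exactly `any` of the token test over the tested positions.
theorem pvLoopA_eq_any (cs tok : List Char) (q : Option Char) (i : Nat) :
    pvLoopA cs tok q i = (pvStarts cs q i).any (fun j => pvStartsAt cs tok j) := by
  induction hn : cs.length - i using Nat.strong_induction_on generalizing q i with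
  | _ n ih =>
    unfold pvLoopA pvStarts
    by_cases h : i < cs.length
    · simp only [h, dif_pos]
      have step1 : cs.length - (i + 1) < n := by omega
      have step2 : cs.length - (i + 2) < n := by omega
      by_cases h1 : cs[i] = '\'' ∨ cs[i] = '"'
      · simp only [if_pos h1]
        by_cases ha : q = none
        · simp only [if_pos ha]; exact ih _ step1 _ _ rfl
        · simp only [if_neg ha]
          by_cases hb : q = some cs[i]
          · simp only [if_pos hb]; exact ih _ step1 _ _ rfl
          · simp only [if_neg hb]; exact ih _ step1 _ _ rfl
      · simp only [if_neg h1]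
        by_cases h2 : cs[i] = '\\'
        · simp only [if_pos h2]; exact ih _ step2 _ _ rfl
        · simp only [if_neg h2]
          by_cases h3 : q = none
          · simp only [if_pos h3]
            by_cases h4 : pvStartsAt cs tok i = true
            · rw [if_pos ⟨h3, h4⟩]
              simp [h4]
            · rw [if_neg (fun hc => h4 hc.2), ih _ step1 _ _ rfl]
              simp [Bool.eq_false_iff.mpr h4]
          · rw [if_neg (fun hc => h3 hc.1), if_neg h3]
            exact ih _ step1 _ _ rfl
    · simp [h]

-- every tested position is inside the string
theorem mem_pvStarts_lt (cs : List Char) (q : Option Char) (i m : Nat)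
    (hm : m ∈ pvStarts cs q i) : m < cs.length := by
  induction hn : cs.length - i using Nat.strong_induction_on generalizing q i with
  | _ n ih =>
    rw [pvStarts] at hm
    by_cases h : i < cs.length
    · simp only [h, dif_pos] at hm
      have step1 : cs.length - (i + 1) < n := by omega
      have step2 : cs.length - (i + 2) < n := by omega
      split_ifs at hm with h1 ha hb h2 h3
      · exact ih _ step1 _ _ hm rfl
      · exact ih _ step1 _ _ hm rfl
      · exact ih _ step1 _ _ hm rfl
      · exact ih _ step2 _ _ hm rfl
      · rcases List.mem_cons.mp hm with rfl | hm
        · exact h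
        · exact ih _ step1 _ _ hm rfl
      · exact ih _ step1 _ _ hm rfl
    · rw [dif_neg h] at hm
      exact absurd hm List.not_mem_nil

-- phase 1 of B records exactly the positions A tests (as a set of Int indices)
theorem pvScanB_mem (cs : List Char) (i : Nat) (q : Option Char) (S : PySem.Set Int) (x : Int) :
    x ∈ pvScanB (PySem.List.enumerate (cs.drop i) i) q false S ↔
      x ∈ S ∨ ∃ m ∈ pvStarts cs q i, x = (m : Int) := by
  induction hn : cs.length - i using Nat.strong_induction_on generalizing q i S with
  | _ n ih =>
    by_cases h : i < cs.length
    · rw [List.drop_eq_getElem_cons h, PySem.List.enumerate_cons, pvScanB_cons, pvStarts]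
      simp only [h, dif_pos, if_neg (by simp : ¬ (false = true))]
      have step1 : cs.length - (i + 1) < n := by omega
      have step2 : cs.length - (i + 2) < n := by omega
      have hcast1 : (i : Int) + 1 = ((i + 1 : Nat) : Int) := by push_cast; ring
      by_cases h1 : cs[i] = '\'' ∨ cs[i] = '"'
      · simp only [if_pos h1]
        by_cases ha : q = none
        · simp only [if_pos ha]
          rw [hcast1, ih _ step1 _ _ _ rfl]
        · simp only [if_neg ha]
          by_cases hb : q = some cs[i]
          · simp only [if_pos hb]
            rw [hcast1, ih _ step1 _ _ _ rfl]
          · simp only [if_neg hb]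
            rw [hcast1, ih _ step1 _ _ _ rfl]
      · simp only [if_neg h1]
        by_cases h2 : cs[i] = '\\'
        · -- backslash: skip flag consumes the next character, landing at i+2
          simp only [if_pos h2]
          rw [hcast1]
          by_cases h' : i + 1 < cs.length
          · rw [List.drop_eq_getElem_cons h', PySem.List.enumerate_cons]
            rw [pvScanB_cons, if_pos rfl]
            have hcast2 : ((i + 1 : Nat) : Int) + 1 = ((i + 2 : Nat) : Int) := by push_cast; ring
            rw [hcast2, ih _ step2 _ _ _ rfl]
          · have hd : cs.drop (i + 1) = [] := List.drop_eq_nil_of_le (by omega)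
            have hs : pvStarts cs q (i + 2) = [] := by rw [pvStarts]; simp; omega
            rw [hd, hs]
            simp [pvScanB, PySem.List.enumerate]
        · simp only [if_neg h2]
          by_cases h3 : q = none
          · simp only [if_pos h3]
            rw [hcast1, ih _ step1 _ _ _ rfl]
            simp only [PySem.Set.mem_add]
            constructor
            · rintro (⟨hx | rfl⟩ | ⟨m, hm, rfl⟩)
              · exact Or.inl hx
              · exact Or.inr ⟨i, List.mem_cons_self, rfl⟩
              · exact Or.inr ⟨m, List.mem_cons_of_mem _ hm, rfl⟩
            · rintro (hx | ⟨m, hm, rfl⟩)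
              · exact Or.inl (Or.inl hx)
              · rcases List.mem_cons.mp hm with rfl | hm
                · exact Or.inl (Or.inr rfl)
                · exact Or.inr ⟨m, hm, rfl⟩
          · simp only [if_neg h3]
            rw [hcast1, ih _ step1 _ _ _ rfl]
    · have hd : cs.drop i = [] := List.drop_eq_nil_of_le (by omega)
      have hs : pvStarts cs q i = [] := by rw [pvStarts]; simp [h]
      rw [hd, hs]
      simp [pvScanB, PySem.List.enumerate]

-- command.find(token, b) for b past the end of the string is -1
theorem findFrom_past_len (cs tok : List Char) (b : Nat) (hb : cs.length < b) :
    PySem.Chars.findFrom cs tok (b : Int) none = -1 := by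
  simp only [PySem.Chars.findFrom]
  split_ifs with h1 h2 <;> first | rfl | omega | (exfalso; omega)

-- a found index is at most the length of the string
theorem findFrom_le_len (cs tok : List Char) (b : Nat) (hb : b ≤ cs.length)
    (h : PySem.Chars.findFrom cs tok (b : Int) none ≠ -1) :
    (PySem.Chars.findFrom cs tok (b : Int) none).toNat ≤ cs.length := by
  obtain ⟨hge, hpre, hmin⟩ := PySem.Chars.findFrom_natCast_spec cs tok b hb h
  by_contra hgt
  push_neg at hgt
  have htok : tok = [] := by
    have : cs.drop (PySem.Chars.findFrom cs tok (b : Int) none).toNat = [] :=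
      List.drop_eq_nil_of_le (by omega)
    rw [this] at hpre
    exact List.prefix_nil.mp hpre
  exact hmin cs.length hb (by omega) (by simp [htok])

-- a prefix match at m ≥ b is an infix of the suffix from b
theorem infix_of_prefix_drop (tok cs : List Char) (m b : Nat)
    (h : tok <+: cs.drop m) (hb : b ≤ m) : tok <:+: cs.drop b := by
  have h2 : cs.drop m = (cs.drop b).drop (m - b) := by rw [List.drop_drop]; congr 1; omega
  rw [h2] at h
  exact h.isInfix.trans (List.drop_suffix _ _).isInfix

-- the find-driven while loop decides: is some occurrence ≥ b of token at a tested position?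
theorem pvFindWhile_eq_any (cs tok : List Char) (tested : PySem.Set Int)
    (hT : ∀ x ∈ tested, ∃ m : Nat, x = (m : Int) ∧ m < cs.length) :
    ∀ (fuel b : Nat), b ≤ cs.length + 1 → cs.length + 2 ≤ fuel + b →
    pvFindWhile cs tok tested fuel (PySem.Chars.findFrom cs tok (b : Int) none)
      = tested.any (fun x => (b : Int) ≤ x && tok.isPrefixOf (cs.drop x.toNat)) := by
  intro fuel
  induction fuel with
  | zero => intro b hb hfuel; omega
  | succ fuel ih =>
    intro b hb hfuel
    by_cases hpast : cs.length < b
    · -- b = length + 1: find returns -1, and no tested index is ≥ b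
      rw [findFrom_past_len cs tok b hpast, pvFindWhile, if_pos rfl]
      symm
      rw [List.any_eq_false]
      intro x hx
      obtain ⟨m, rfl, hm⟩ := hT x hx
      simp only [Bool.and_eq_true, decide_eq_true_eq, not_and]
      intro hle
      exfalso
      have : b ≤ m := by exact_mod_cast hle
      omega
    · push_neg at hpast
      by_cases hfound : PySem.Chars.findFrom cs tok (b : Int) none = -1
      · -- no occurrence from b on: no tested position ≥ b can match
        rw [hfound, pvFindWhile, if_pos rfl]
        symm
        rw [List.any_eq_false]
        intro x hx
        obtain ⟨m, rfl, hm⟩ := hT x hx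
        simp only [Bool.and_eq_true, not_and]
        intro hle hpre
        have hbm : b ≤ m := by
          have := of_decide_eq_true hle
          exact_mod_cast this
        have hpre' : tok <+: cs.drop ((m : Int)).toNat := List.isPrefixOf_iff_prefix.mp hpre
        rw [Int.toNat_natCast] at hpre'
        exact (PySem.Chars.findFrom_natCast_eq_neg_one_iff cs tok b hpast).mp hfound
          (infix_of_prefix_drop tok cs m b hpre' hbm)
      · obtain ⟨hge, hpre, hmin⟩ := PySem.Chars.findFrom_natCast_spec cs tok b hpast hfound
        set j := PySem.Chars.findFrom cs tok (b : Int) none with hj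
        have hj0 : 0 ≤ j := le_trans (by exact_mod_cast Nat.zero_le b) hge
        have hjlen : j.toNat ≤ cs.length := findFrom_le_len cs tok b hpast hfound
        have hbj : b ≤ j.toNat := by omega
        rw [pvFindWhile]
        simp only [if_neg hfound]
        by_cases hmem : j ∈ tested
        · rw [if_pos (by rw [PySem.Set.contains_eq_listContains]; exact List.contains_iff_mem.mpr hmem)]
          symm
          rw [List.any_eq_true]
          refine ⟨j, hmem, ?_⟩
          simp only [Bool.and_eq_true, decide_eq_true_eq]
          exact ⟨by omega, List.isPrefixOf_iff_prefix.mpr hpre⟩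
        · rw [if_neg (by rw [PySem.Set.contains_eq_listContains]; simpa using hmem)]
          have hcast : j + 1 = ((j.toNat + 1 : Nat) : Int) := by omega
          rw [hcast, ih (j.toNat + 1) (by omega) (by omega)]
          apply PySem.List.any_congr_mem
          intro x hx
          obtain ⟨m, rfl, hm⟩ := hT x hx
          by_cases hlt : (m : Int) < b
          · have h1 : decide (((b : Nat) : Int) ≤ (m : Int)) = false := decide_eq_false (by omega)
            have h2 : decide (((j.toNat + 1 : Nat) : Int) ≤ (m : Int)) = false := decide_eq_false (by push_cast; omega)
            rw [h1, h2]
          · push_neg at hlt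
            have hbm : b ≤ m := by exact_mod_cast hlt
            by_cases hmj : m < j.toNat
            · -- strictly before the first occurrence: no match either way
              have hnp : ¬ tok <+: cs.drop m := hmin m hbm hmj
              have hpf : tok.isPrefixOf (cs.drop ((m : Int)).toNat) = false := by
                rw [Int.toNat_natCast]
                exact Bool.eq_false_iff.mpr (fun hc => hnp (List.isPrefixOf_iff_prefix.mp hc))
              rw [hpf, Bool.and_false, Bool.and_false]
            · push_neg at hmj
              have hne : (m : Int) ≠ j := fun hc => hmem (hc ▸ hx)
              have hmj' : j.toNat < m := by
                rcases Nat.lt_or_ge j.toNat m with h' | h'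
                · exact h'
                · exfalso; exact hne (by omega)
              have h1 : decide (((b : Nat) : Int) ≤ (m : Int)) = true := decide_eq_true (by exact_mod_cast hbm)
              have h2 : decide (((j.toNat + 1 : Nat) : Int) ≤ (m : Int)) = true := decide_eq_true (by push_cast; omega)
              rw [h1, h2]

-- assembling B: the scan + find loop equals `any` of the token test over A's tested positions
theorem alt_eq_any (command token : String) :
    has_unquoted_py_alt command token
      = (pvStarts command.toList none 0).any (fun j => pvStartsAt command.toList token.toList j) := by
  set cs := command.toList with hcs
  set tok := token.toList with htok
  have hmem : ∀ x : Int, x ∈ pvScanB (PySem.List.enumerate cs 0) none false PySem.Set.empty ↔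
      ∃ m ∈ pvStarts cs none 0, x = (m : Int) := by
    intro x
    have := pvScanB_mem cs 0 none PySem.Set.empty x
    simpa [PySem.Set.empty] using this
  have hT : ∀ x ∈ pvScanB (PySem.List.enumerate cs 0) none false PySem.Set.empty,
      ∃ m : Nat, x = (m : Int) ∧ m < cs.length := by
    intro x hx
    obtain ⟨m, hm, rfl⟩ := (hmem x).mp hx
    exact ⟨m, rfl, mem_pvStarts_lt cs none 0 m hm⟩
  have h0 : PySem.Chars.find cs tok = PySem.Chars.findFrom cs tok ((0 : Nat) : Int) none := by
    rw [(by norm_num : ((0 : Nat) : Int) = 0), PySem.Chars.findFrom_zero]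
  have halt : has_unquoted_py_alt command token
      = pvFindWhile cs tok (pvScanB (PySem.List.enumerate cs 0) none false PySem.Set.empty)
          (cs.length + 2) (PySem.Chars.find cs tok) := rfl
  rw [halt, h0, pvFindWhile_eq_any cs tok _ hT (cs.length + 2) 0 (by omega) (by omega)]
  rcases hres : (pvStarts cs none 0).any (fun j => pvStartsAt cs tok j) with _ | _
  · rw [List.any_eq_false]
    rw [List.any_eq_false] at hres
    intro x hx
    obtain ⟨m, hm, rfl⟩ := (hmem x).mp hx
    have := hres m hm
    simp only [pvStartsAt] at this
    simp only [Bool.and_eq_true, not_and]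
    intro _
    rw [Int.toNat_natCast]
    simpa using this
  · rw [List.any_eq_true]
    rw [List.any_eq_true] at hres
    obtain ⟨m, hm, hpf⟩ := hres
    refine ⟨(m : Int), (hmem _).mpr ⟨m, hm, rfl⟩, ?_⟩
    simp only [pvStartsAt] at hpf
    simp only [Bool.and_eq_true, decide_eq_true_eq]
    exact ⟨by exact_mod_cast Nat.zero_le m, by rw [Int.toNat_natCast]; exact hpf⟩

-- ===== VERDICT (by name: the statement is the Claim_ definition above) =====
theorem has_unquoted_py_spec : Claim_equal_has_unquoted_py := by
  intro command token _
  unfold Spec_has_unquoted_py has_unquoted_py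
  rw [pvLoopA_eq_any, alt_eq_any]
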